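-- pv_equiv track=rewrite | github.com/stammt/advent-of-code | aoc2024/src/python/aoc_utils.py | split_on_empty_lines
-- ===== SOURCE A (Python) =====
-- def split_on_empty_lines(lines:list[str]) -> list[list[str]]:
--     blanks = [i for i in range(len(lines)) if len(lines[i]) == 0]
--     nextSectionStart = 0
--     results = []
--     for b in blanks:
--         if nextSectionStart > len(lines): break
--         results.append([s for s in lines[nextSectionStart:b]])
--         nextSectionStart = b + 1
--     if nextSectionStart <= len(lines) - 1:
--         results.append([s for s in lines[nextSectionStart:]])
--     return results
-- ===== SOURCE B (Python) =====
-- def split_on_empty_lines(lines: list[str]) -> list[list[str]]: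
--     results = []
--     current = []
--     for line in lines:
--         if line:
--             current.append(line)
--         else:
--             results.append(current)
--             current = []
--     if current:
--         results.append(current)
--     return results
-- ===== Notes on version B (the rewrite author's own statement) =====
-- stated objective: simpler
-- what changed: Replaced the pre-built blank-index list plus range-slicing (with its break/tail-check bookkeeping) by a single streaming pass that accumulates the current section and flushes it on each blank line, appending the final section only if non-empty.
import Mathlib
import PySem

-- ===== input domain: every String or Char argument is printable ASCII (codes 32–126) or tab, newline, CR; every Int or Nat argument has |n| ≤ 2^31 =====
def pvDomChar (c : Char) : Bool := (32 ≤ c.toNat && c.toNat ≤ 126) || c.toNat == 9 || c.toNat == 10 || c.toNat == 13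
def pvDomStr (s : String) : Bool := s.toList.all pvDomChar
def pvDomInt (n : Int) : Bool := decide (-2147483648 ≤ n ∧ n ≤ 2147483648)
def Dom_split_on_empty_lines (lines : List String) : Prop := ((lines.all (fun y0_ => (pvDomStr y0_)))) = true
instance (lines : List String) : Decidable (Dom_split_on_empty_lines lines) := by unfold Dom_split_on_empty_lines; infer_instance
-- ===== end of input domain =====

-- B replaces A's blank-index list + range-slicing by one streaming pass (simpler, one accumulating loop).


-- ===== PORT A =====
-- blanks = [i for i in range(len(lines)) if len(lines[i]) == 0]
-- (pyGetD with default "" is exact here: every i produced by range(len(lines)) is in range)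
def pvBlanksA (lines : List String) : List Int :=
  (PySem.List.pyRange 0 lines.length 1).filter
    (fun i => decide (PySem.Str.len (PySem.List.pyGetD lines i "") = 0))

-- the 'for b in blanks' loop; returns (results, nextSectionStart); the 'break' returns early
def pvALoop (lines : List String) : List Int → Int → List (List String) →
    (List (List String)) × Int
  | [], next, res => (res, next)
  | b :: bs, next, res =>
    if next > (lines.length : Int) then (res, next)
    else pvALoop lines bs (b + 1)
      (res ++ [(PySem.List.slice lines (some next) (some b)).map (fun s => s)])

def split_on_empty_lines (lines : List String) : List (List String) :=
  let blanks := pvBlanksA lines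
  let st := pvALoop lines blanks 0 []
  if st.2 ≤ (lines.length : Int) - 1 then
    st.1 ++ [(PySem.List.slice lines (some st.2) none).map (fun s => s)]
  else st.1

-- ===== PORT B =====
-- single streaming pass: fold over the lines with state (results, current)
def split_on_empty_lines_alt (lines : List String) : List (List String) :=
  let st := lines.foldl
    (fun (st : List (List String) × List String) line =>
      if line ≠ "" then (st.1, st.2 ++ [line]) else (st.1 ++ [st.2], []))
    ([], [])
  if st.2 ≠ [] then st.1 ++ [st.2] else st.1

-- ===== PRECONDITION & SPEC =====
def Spec_split_on_empty_lines (lines : List String) (out : List (List String)) : Prop := out = split_on_empty_lines_alt lines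
instance (lines : List String) (out : List (List String)) : Decidable (Spec_split_on_empty_lines lines out) := by unfold Spec_split_on_empty_lines; infer_instance

-- ===== CLAIM (what is proved, stated in full; the proofs are below) =====
def Claim_equal_split_on_empty_lines : Prop := ∀ (lines : List String), Dom_split_on_empty_lines lines → Spec_split_on_empty_lines lines (split_on_empty_lines lines)

-- ===== LEMMAS AND PROOFS =====

-- the streaming recursion both programs compute
def pvF : List String → List String → List (List String)
  | cur, [] => if cur = [] then [] else [cur]
  | cur, l :: rest => if l = "" then cur :: pvF [] rest else pvF (cur ++ [l]) rest

def pvConsHead (l : String) : List (List String) → List (List String)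
  | [] => [[l]]
  | s :: ss => (l :: s) :: ss

-- Nat shadow of A's loop (all indices A manipulates are natural)
def pvALoopN (lines : List String) : List Nat → Nat → List (List String) →
    (List (List String)) × Nat
  | [], s, res => (res, s)
  | b :: bs, s, res =>
    if s > lines.length then (res, s)
    else pvALoopN lines bs (b + 1) (res ++ [(lines.drop s).take (b - s)])

def pvBlanksN (lines : List String) : List Nat :=
  (List.range lines.length).filter (fun i => lines.getD i "" == "")

-- Nat-level characterization of A's whole computation
def pvAChar (lines : List String) : List (List String) :=
  let st := pvALoopN lines (pvBlanksN lines) 0 []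
  if st.2 < lines.length then st.1 ++ [lines.drop st.2] else st.1

-- ---- B-side characterization ----

theorem pvB_foldl (lines : List String) : ∀ (res : List (List String)) (cur : List String),
    (let st := lines.foldl
        (fun (st : List (List String) × List String) line =>
          if line ≠ "" then (st.1, st.2 ++ [line]) else (st.1 ++ [st.2], []))
        (res, cur)
      if st.2 ≠ [] then st.1 ++ [st.2] else st.1) = res ++ pvF cur lines := by
  induction lines with
  | nil =>
    intro res cur
    simp only [List.foldl_nil, pvF]
    by_cases h : cur = [] <;> simp [h]
  | cons l rest ih =>
    intro res cur
    simp only [List.foldl_cons, pvF]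
    by_cases h : l = ""
    · subst h
      rw [if_neg (by simp : ¬ ("" ≠ "")), if_pos rfl, ih (res ++ [cur]) []]
      simp
    · rw [if_pos h, if_neg h]
      exact ih res (cur ++ [l])

theorem pvB_eq_pvF (lines : List String) :
    split_on_empty_lines_alt lines = pvF [] lines := by
  have := pvB_foldl lines [] []
  simpa [split_on_empty_lines_alt] using this

theorem pvF_consHead : ∀ (lines cur : List String) (c : String),
    pvF (c :: cur) lines = pvConsHead c (pvF cur lines) := by
  intro lines
  induction lines with
  | nil =>
    intro cur c
    cases cur <;> simp [pvF, pvConsHead]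
  | cons l rest ih =>
    intro cur c
    by_cases h : l = ""
    · simp [pvF, h, pvConsHead]
    · simp only [pvF, if_neg h]
      rw [List.cons_append, ih]

-- ---- A-side: bridge the Int port to the Nat shadow ----

theorem pvBlanksA_eq (lines : List String) :
    pvBlanksA lines = (pvBlanksN lines).map (fun i : Nat => (i : Int)) := by
  unfold pvBlanksA pvBlanksN
  rw [PySem.List.pyRange_zero_natCast, List.filter_map]
  congr 1
  apply List.filter_congr
  intro i hi
  simp only [Function.comp_apply, PySem.List.pyGetD_natCast, PySem.Str.len_eq]
  cases he : lines[i]?.getD "" == ""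
  · simp_all [beq_eq_false_iff_ne]
  · simp_all

theorem pvALoop_eq_N (lines : List String) : ∀ (bs : List Nat) (s : Nat) (res : List (List String)),
    pvALoop lines (bs.map (fun i : Nat => (i : Int))) ((s : Nat) : Int) res =
      ((pvALoopN lines bs s res).1, ((pvALoopN lines bs s res).2 : Int)) := by
  intro bs
  induction bs with
  | nil => intro s res; simp [pvALoop, pvALoopN]
  | cons b bs ih =>
    intro s res
    simp only [List.map_cons, pvALoop, pvALoopN]
    by_cases h : s > lines.length
    · rw [if_pos (by exact_mod_cast h), if_pos h]
    · rw [if_neg (by exact_mod_cast h), if_neg h]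
      rw [PySem.List.slice_natCast]
      have hc : ((b : Nat) : Int) + 1 = (((b + 1 : Nat)) : Int) := by push_cast; ring
      rw [hc, ih]
      simp [List.map_id']

theorem pvA_eq_char (lines : List String) :
    split_on_empty_lines lines = pvAChar lines := by
  simp only [split_on_empty_lines, pvAChar, pvBlanksA_eq]
  rw [show (0 : Int) = ((0 : Nat) : Int) from rfl, pvALoop_eq_N]
  by_cases h : (pvALoopN lines (pvBlanksN lines) 0 []).2 < lines.length
  · rw [if_pos (show ((pvALoopN lines (pvBlanksN lines) 0 []).2 : Int) ≤ (lines.length : Int) - 1 by omega),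
      if_pos h, PySem.List.slice_from_natCast]
    simp [List.map_id']
  · rw [if_neg (show ¬ ((pvALoopN lines (pvBlanksN lines) 0 []).2 : Int) ≤ (lines.length : Int) - 1 by omega),
      if_neg h]

-- one unfold step of the Nat loop (the break guard is false)
theorem pvALoopN_cons_step (lines : List String) (b : Nat) (bs : List Nat) (s : Nat)
    (res : List (List String)) (h : ¬ s > lines.length) :
    pvALoopN lines (b :: bs) s res =
      pvALoopN lines bs (b + 1) (res ++ [(lines.drop s).take (b - s)]) := by
  simp [pvALoopN, h]

-- accumulator lemma for the Nat loop
theorem pvALoopN_acc (lines : List String) : ∀ (bs : List Nat) (s : Nat) (res : List (List String)),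
    pvALoopN lines bs s res =
      (res ++ (pvALoopN lines bs s []).1, (pvALoopN lines bs s []).2) := by
  intro bs
  induction bs with
  | nil => intro s res; simp [pvALoopN]
  | cons b bs ih =>
    intro s res
    simp only [pvALoopN]
    by_cases h : s > lines.length
    · simp [h]
    · rw [if_neg h, if_neg h, ih (b + 1) (res ++ _), ih (b + 1) ([] ++ _)]
      simp

-- shift lemma: running on (x :: rest) from s+1 with shifted blanks = running on rest from s
theorem pvALoopN_shift (x : String) (rest : List String) :
    ∀ (bs : List Nat) (s : Nat) (res : List (List String)),
      pvALoopN (x :: rest) (bs.map (· + 1)) (s + 1) res =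
        ((pvALoopN rest bs s res).1, (pvALoopN rest bs s res).2 + 1) := by
  intro bs
  induction bs with
  | nil => intro s res; simp [pvALoopN]
  | cons b bs ih =>
    intro s res
    simp only [List.map_cons, pvALoopN, List.length_cons]
    by_cases h : s > rest.length
    · rw [if_pos (by omega), if_pos h]
    · rw [if_neg (by omega), if_neg h]
      rw [List.drop_succ_cons, Nat.succ_sub_succ]
      exact ih (b + 1) _

theorem pvBlanksN_cons (x : String) (rest : List String) :
    pvBlanksN (x :: rest) =
      (if x = "" then [0] else []) ++ (pvBlanksN rest).map (· + 1) := by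
  unfold pvBlanksN
  rw [List.length_cons, List.range_succ_eq_map, List.filter_cons, List.filter_map]
  by_cases h : x = "" <;>
    simp [h, Function.comp_def]

-- A's recursive structure, at the Nat level
theorem pvAChar_cons_blank (rest : List String) :
    pvAChar ("" :: rest) = [] :: pvAChar rest := by
  unfold pvAChar
  rw [pvBlanksN_cons, if_pos rfl, List.singleton_append]
  rw [pvALoopN_cons_step ("" :: rest) 0 _ 0 [] (by omega)]
  simp only [List.drop_zero, Nat.sub_zero, List.take_zero, List.nil_append]
  rw [pvALoopN_shift "" rest _ 0 [[]], pvALoopN_acc rest _ 0 [[]]]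
  simp only [List.length_cons]
  by_cases h : (pvALoopN rest (pvBlanksN rest) 0 []).2 < rest.length
  · rw [if_pos (show (pvALoopN rest (pvBlanksN rest) 0 []).2 + 1 < rest.length + 1 by omega),
      if_pos h]
    simp [List.drop_succ_cons]
  · rw [if_neg (show ¬ (pvALoopN rest (pvBlanksN rest) 0 []).2 + 1 < rest.length + 1 by omega),
      if_neg h]
    simp

theorem pvAChar_cons_nonblank (x : String) (rest : List String) (hx : x ≠ "") :
    pvAChar (x :: rest) = pvConsHead x (pvAChar rest) := by
  unfold pvAChar
  rw [pvBlanksN_cons, if_neg hx, List.nil_append]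
  cases hbs : pvBlanksN rest with
  | nil =>
    simp only [List.map_nil, pvALoopN, List.length_cons]
    by_cases hn : rest.length = 0
    · have hr : rest = [] := List.length_eq_zero_iff.mp hn
      subst hr
      simp [pvConsHead]
    · rw [if_pos (by omega), if_pos (by omega)]
      rcases rest with _ | ⟨y, ys⟩
      · simp at hn
      · simp [pvConsHead]
  | cons b bs =>
    simp only [List.map_cons]
    rw [pvALoopN_cons_step (x :: rest) (b + 1) _ 0 [] (by omega),
      pvALoopN_cons_step rest b bs 0 [] (by omega)]
    simp only [List.drop_zero, Nat.sub_zero, List.nil_append, List.take_succ_cons]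
    rw [pvALoopN_shift x rest bs (b + 1) [x :: rest.take b],
      pvALoopN_acc rest bs (b + 1) [x :: rest.take b],
      pvALoopN_acc rest bs (b + 1) [rest.take b]]
    simp only [List.length_cons]
    by_cases h : (pvALoopN rest bs (b + 1) []).2 < rest.length
    · rw [if_pos (show (pvALoopN rest bs (b + 1) []).2 + 1 < rest.length + 1 by omega),
        if_pos h]
      simp [pvConsHead, List.drop_succ_cons]
    · rw [if_neg (show ¬ (pvALoopN rest bs (b + 1) []).2 + 1 < rest.length + 1 by omega),
        if_neg h]
      simp [pvConsHead]

theorem pvA_eq_pvF (lines : List String) :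
    split_on_empty_lines lines = pvF [] lines := by
  rw [pvA_eq_char]
  induction lines with
  | nil => decide
  | cons x rest ih =>
    by_cases hx : x = ""
    · subst hx
      rw [pvAChar_cons_blank, ih]
      simp [pvF]
    · rw [pvAChar_cons_nonblank x rest hx, ih]
      have h2 : pvF [] (x :: rest) = pvF ([] ++ [x]) rest := by simp [pvF, hx]
      rw [h2]
      simpa using (pvF_consHead rest [] x).symm

-- ===== VERDICT (by name: the statement is the Claim_ definition above) =====
theorem split_on_empty_lines_spec : Claim_equal_split_on_empty_lines := by
  intro lines _
  unfold Spec_split_on_empty_lines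
  rw [pvA_eq_pvF, pvB_eq_pvF]
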